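-- pv_equiv track=rewrite | github.com/NeelShroff/bajaj-hackathon- | src/document_loader.py | _create_enhanced_chunks_from_text
-- ===== SOURCE A (Python) =====
-- from typing import List, Dict, Any, Optional
--
-- def _create_enhanced_chunks_from_text(text: str) -> List[Dict[str, Any]]:
--     """
--     Create enhanced chunks from large documents without losing content.
--     Uses semantic boundaries and preserves complete sections.
--     """
--     # Split by major section indicators first
--     major_sections = []
--     current_section = ""
--
--     lines = text.split('\n')
--     section_indicators = ['SECTION', 'CHAPTER', 'PART', 'ARTICLE', 'CLAUSE', 'DEFINITION', 'BENEFIT', 'EXCLUSION', 'CONDITION']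
--
--     for line in lines:
--         line_upper = line.upper().strip()
--         is_section_start = any(indicator in line_upper for indicator in section_indicators)
--
--         if is_section_start and current_section.strip():
--             # Save previous section
--             major_sections.append(current_section.strip())
--             current_section = line + '\n'
--         else:
--             current_section += line + '\n'
--
--     # Add the last section
--     if current_section.strip():
--         major_sections.append(current_section.strip())
--
--     # If no major sections found, split by paragraphs
--     if len(major_sections) <= 1:
--         major_sections = [section.strip() for section in text.split('\n\n') if section.strip()]
--
--     # Convert to document sections
--     sections = []
--     for i, section_text in enumerate(major_sections):
--         if len(section_text) > 100:  # Only include substantial sections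
--             sections.append({
--                 "section_id": f"SECTION_{i+1}",
--                 "content": section_text,
--                 "type": "general"
--             })
--
--     return sections if sections else [{"section_id": "FULL_DOCUMENT", "content": text, "type": "general"}]
-- ===== SOURCE B (Python) =====
-- from typing import List, Dict, Any
--
-- _SECTION_INDICATORS = ['SECTION', 'CHAPTER', 'PART', 'ARTICLE', 'CLAUSE',
--                        'DEFINITION', 'BENEFIT', 'EXCLUSION', 'CONDITION']
--
--
-- def _is_section_start(line: str) -> bool:
--     u = line.upper().strip()
--     return any(ind in u for ind in _SECTION_INDICATORS)
--
--
-- def _create_enhanced_chunks_from_text(text: str) -> List[Dict[str, Any]]: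
--     lines = text.split('\n')
--
--     # Pass 1: boundary indices.  A line starts a new section when it carries a
--     # section indicator and some non-whitespace content has already appeared.
--     # (The "seen content" flag is monotone: an indicator line is itself
--     # non-whitespace, so once content is seen every indicator line is a cut.)
--     cuts = []
--     seen = False
--     for i, line in enumerate(lines):
--         if seen and _is_section_start(line):
--             cuts.append(i)
--         seen = seen or line.strip() != ''
--
--     # Pass 2: slice the lines at the cut indices into groups.
--     groups = []
--     prev = 0
--     for c in cuts:
--         groups.append(lines[prev:c])
--         prev = c
--     groups.append(lines[prev:])
--
--     major_sections = [s for s in ('\n'.join(g).strip() for g in groups) if s]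
--
--     if len(major_sections) <= 1:
--         major_sections = [p.strip() for p in text.split('\n\n') if p.strip()]
--
--     sections = [{"section_id": f"SECTION_{i+1}", "content": s, "type": "general"}
--                 for i, s in enumerate(major_sections) if len(s) > 100]
--
--     return sections if sections else [{"section_id": "FULL_DOCUMENT",
--                                        "content": text, "type": "general"}]
-- ===== Notes on version B (the rewrite author's own statement) =====
-- stated objective: alternative
-- what changed: A builds each section by accumulating one growing string inside a single pass whose blank-tracking state resets at every boundary; B instead makes two passes over the line list: a scan under a monotone seen-content flag that collects boundary indices, then slicing the line list at those indices and join/strip-ing each slice, with the substantial-section filter done by a comprehension instead of an append loop.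
import Mathlib
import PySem

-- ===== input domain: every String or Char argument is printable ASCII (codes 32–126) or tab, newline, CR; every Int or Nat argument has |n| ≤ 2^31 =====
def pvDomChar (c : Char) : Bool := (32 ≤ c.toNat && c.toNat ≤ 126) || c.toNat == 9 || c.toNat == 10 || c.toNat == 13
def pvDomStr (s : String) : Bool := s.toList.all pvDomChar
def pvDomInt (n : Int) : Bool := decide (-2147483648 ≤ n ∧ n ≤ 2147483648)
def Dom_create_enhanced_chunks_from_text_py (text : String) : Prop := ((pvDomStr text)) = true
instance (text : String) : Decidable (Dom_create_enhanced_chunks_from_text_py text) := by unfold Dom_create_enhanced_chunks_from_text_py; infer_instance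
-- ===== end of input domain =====

-- B replaces A's single pass that accumulates a growing section string with a resetting
-- blank-tracking state by two passes: a scan collecting boundary indices under a monotone
-- seen-content flag, then slicing the line list at those indices; objective: alternative
-- decomposition (no speed claim).

def pvIndicators : List String :=
  ["SECTION", "CHAPTER", "PART", "ARTICLE", "CLAUSE", "DEFINITION", "BENEFIT", "EXCLUSION", "CONDITION"]

-- ===== PORT A =====
def create_enhanced_chunks_from_text_py (text : String) : List (List (String × String)) :=
  let lines := (PySem.Str.split? text "\n").getD []
  let st := lines.foldl (fun (st : List String × String) line =>
      let line_upper := PySem.Str.strip (PySem.Str.upper line)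
      if (pvIndicators.any fun ind => PySem.Str.isIn ind line_upper) && decide (PySem.Str.strip st.2 ≠ "") then
        (st.1 ++ [PySem.Str.strip st.2], line ++ "\n")
      else
        (st.1, st.2 ++ line ++ "\n")) ([], "")
  let ms0 := if PySem.Str.strip st.2 ≠ "" then st.1 ++ [PySem.Str.strip st.2] else st.1
  let ms := if PySem.List.len ms0 ≤ 1 then
      ((PySem.Str.split? text "\n\n").getD []).filterMap
        (fun s => if PySem.Str.strip s ≠ "" then some (PySem.Str.strip s) else none)
    else ms0
  let sections := (PySem.List.enumerate ms).foldl (fun acc p =>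
      if 100 < PySem.Str.len p.2 then
        acc ++ [[("section_id", "SECTION_" ++ PySem.Int.toStr (p.1 + 1)), ("content", p.2), ("type", "general")]]
      else acc) []
  if sections ≠ [] then sections
  else [[("section_id", "FULL_DOCUMENT"), ("content", text), ("type", "general")]]

-- ===== PORT B =====
def pvIsSectionStart (line : String) : Bool :=
  pvIndicators.any fun ind => PySem.Str.isIn ind (PySem.Str.strip (PySem.Str.upper line))

def create_enhanced_chunks_from_text_py_alt (text : String) : List (List (String × String)) :=
  let lines := (PySem.Str.split? text "\n").getD []
  -- pass 1: boundary indices, with a monotone "seen content" flag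
  let cs := (PySem.List.enumerate lines).foldl (fun (st : List Int × Bool) p =>
      (if st.2 && pvIsSectionStart p.2 then st.1 ++ [p.1] else st.1,
       st.2 || decide (PySem.Str.strip p.2 ≠ ""))) ([], false)
  -- pass 2: slice the line list at the cut indices
  let gp := cs.1.foldl (fun (st : List (List String) × Int) c =>
      (st.1 ++ [PySem.List.slice lines (some st.2) (some c)], c)) ([], 0)
  let groups := gp.1 ++ [PySem.List.slice lines (some gp.2) none]
  let ms0 := (groups.map fun g => PySem.Str.strip (PySem.Str.join "\n" g)).filter (fun s => decide (s ≠ ""))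
  let ms := if PySem.List.len ms0 ≤ 1 then
      ((PySem.Str.split? text "\n\n").getD []).filterMap
        (fun s => if PySem.Str.strip s ≠ "" then some (PySem.Str.strip s) else none)
    else ms0
  let sections := (PySem.List.enumerate ms).filterMap (fun p =>
      if 100 < PySem.Str.len p.2 then
        some [("section_id", "SECTION_" ++ PySem.Int.toStr (p.1 + 1)), ("content", p.2), ("type", "general")]
      else none)
  if sections ≠ [] then sections
  else [[("section_id", "FULL_DOCUMENT"), ("content", text), ("type", "general")]]

-- ===== PRECONDITION & SPEC =====
def Spec_create_enhanced_chunks_from_text_py (text : String) (out : List (List (String × String))) : Prop := out = create_enhanced_chunks_from_text_py_alt text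
instance (text : String) (out : List (List (String × String))) : Decidable (Spec_create_enhanced_chunks_from_text_py text out) := by unfold Spec_create_enhanced_chunks_from_text_py; infer_instance

-- ===== CLAIM (what is proved, stated in full; the proofs are below) =====
def Claim_equal_create_enhanced_chunks_from_text_py : Prop := ∀ (text : String), Dom_create_enhanced_chunks_from_text_py text → Spec_create_enhanced_chunks_from_text_py text (create_enhanced_chunks_from_text_py text)

-- ===== LEMMAS AND PROOFS =====

-- proof-side vocabulary
def pvNonws (l : String) : Bool := decide (PySem.Str.strip l ≠ "")
def pvAnyNonws (g : List String) : Bool := g.any pvNonws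
def pvJ (g : List String) : List Char := (g.map fun l => l.toList ++ ['\n']).flatten

theorem pv_strip_append_space (cs : List Char) (c : Char) (h : PySem.Chars.isspace c) :
    PySem.Chars.strip (cs ++ [c]) = PySem.Chars.strip cs := by
  simp only [PySem.Chars.strip, PySem.Chars.rstrip, PySem.Chars.lstrip]
  rw [List.dropWhile_append]
  split_ifs with h1
  · simp at h1
    rw [List.dropWhile_eq_nil_iff.mpr h1]
    simp [h]
  · simp [h]

theorem pv_J_append_nl (g : List String) (hg : g ≠ []) :
    pvJ g = PySem.Chars.join ['\n'] (g.map String.toList) ++ ['\n'] := by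
  induction g with
  | nil => simp at hg
  | cons l g ih =>
    cases g with
    | nil => simp [pvJ, PySem.Chars.join, List.intercalate]
    | cons m g =>
      have := ih (by simp)
      simp only [pvJ, List.map_cons, List.flatten_cons] at this ⊢
      rw [this, PySem.Chars.join_cons_cons]
      simp

theorem pv_J_eq_join (g : List String) :
    PySem.Chars.strip (pvJ g) = PySem.Chars.strip (PySem.Chars.join ['\n'] (g.map String.toList)) := by
  cases g with
  | nil => simp [pvJ, PySem.Chars.join, List.intercalate]
  | cons l g => rw [pv_J_append_nl _ (by simp), pv_strip_append_space _ _ (by decide)]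

theorem pv_strip_eq_nil_iff (cs : List Char) :
    PySem.Chars.strip cs = [] ↔ ∀ c ∈ cs, PySem.Chars.isspace c := by
  simp only [PySem.Chars.strip, PySem.Chars.rstrip, PySem.Chars.lstrip,
    List.reverse_eq_nil_iff, List.dropWhile_eq_nil_iff, List.mem_reverse]
  constructor
  · intro h c hc
    by_cases hd : List.dropWhile PySem.Chars.isspace cs = []
    · exact List.dropWhile_eq_nil_iff.mp hd c hc
    · exact absurd (h _ (List.head_mem hd)) (by simp [List.head_dropWhile_not PySem.Chars.isspace hd])
  · intro h x hx
    exact h x ((List.dropWhile_sublist _).subset hx)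

theorem pv_nonws_iff (l : String) : pvNonws l = true ↔ ¬ ∀ c ∈ l.toList, PySem.Chars.isspace c := by
  rw [pvNonws, decide_eq_true_iff, ← pv_strip_eq_nil_iff]
  constructor
  · intro h h2
    exact h (String.toList_inj.mp (by simp [h2]))
  · intro h h2
    have := congrArg String.toList h2
    simp at this
    exact h this

theorem pv_strip_J_ne_nil_iff (g : List String) :
    PySem.Chars.strip (pvJ g) ≠ [] ↔ pvAnyNonws g = true := by
  rw [Ne, pv_strip_eq_nil_iff]
  simp only [pvAnyNonws, List.any_eq_true]
  constructor
  · intro h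
    by_contra h2
    push_neg at h2
    apply h
    intro c hc
    simp only [pvJ, List.mem_flatten, List.mem_map] at hc
    obtain ⟨_, ⟨l, hl, rfl⟩, hc⟩ := hc
    rcases List.mem_append.mp hc with hc | hc
    · have := (pv_nonws_iff l).not.mp (by simpa using h2 l hl)
      push_neg at this
      exact this c hc
    · simp at hc; subst hc; decide
  · rintro ⟨l, hl, hnw⟩ hall
    rw [pv_nonws_iff] at hnw
    exact hnw (fun c hc => hall c (by simp only [pvJ, List.mem_flatten, List.mem_map]; exact ⟨_, ⟨l, hl, rfl⟩, by simp [hc]⟩))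

theorem pv_upperChar_space (c : Char) (h : PySem.Chars.isspace c) : PySem.Chars.upperChar c = c := by
  rw [PySem.Chars.upperChar]
  split_ifs with h2
  · exfalso
    simp only [PySem.Chars.isspace, Bool.or_eq_true, Bool.and_eq_true, decide_eq_true_iff] at h
    simp only [PySem.Chars.islower, Bool.and_eq_true, decide_eq_true_iff, Char.le_def,
      UInt32.le_iff_toNat_le] at h2
    have e1 : ('a').val.toNat = 97 := by decide
    have e2 : ('z').val.toNat = 122 := by decide
    have e3 : c.val.toNat = c.toNat := rfl
    rw [e1, e2, e3] at h2
    omega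
  · rfl

theorem pv_isStart_nonws (l : String) (h : pvIsSectionStart l = true) : pvNonws l = true := by
  by_contra hn
  have hall : ∀ c ∈ l.toList, PySem.Chars.isspace c := by
    have := (pv_nonws_iff l).not.mp (by simpa using hn)
    push_neg at this
    exact this
  have hu : PySem.Str.strip (PySem.Str.upper l) = "" := by
    apply String.toList_inj.mp
    simp only [PySem.Str.toList_strip, String.toList_empty]
    rw [pv_strip_eq_nil_iff]
    intro c hc
    simp [PySem.Str.upper, PySem.Chars.upper] at hc
    obtain ⟨d, hd, rfl⟩ := hc
    rw [pv_upperChar_space d (hall d hd)]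
    exact hall d hd
  rw [pvIsSectionStart, hu] at h
  simp at h
  revert h
  decide

def pvStripJoin (g : List String) : String := PySem.Str.strip (PySem.Str.join "\n" g)
def pvGrp (seen : Bool) (g : List String) : List String → List (List String)
  | [] => [g]
  | l :: ls => if seen && pvIsSectionStart l then g :: pvGrp (seen || pvNonws l) [l] ls
               else pvGrp (seen || pvNonws l) (g ++ [l]) ls

theorem pv_strip_toList (g : List String) (cur : String) (h : cur.toList = pvJ g) :
    (PySem.Str.strip cur).toList = PySem.Chars.strip (pvJ g) := by simp [h]

theorem pv_strip_eq_stripJoin (g : List String) (cur : String) (h : cur.toList = pvJ g) :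
    PySem.Str.strip cur = pvStripJoin g := by
  apply String.toList_inj.mp
  rw [pv_strip_toList g cur h, pv_J_eq_join]
  simp [pvStripJoin, PySem.Str.toList_join]

theorem pv_cond_eq (g : List String) (cur : String) (h : cur.toList = pvJ g) :
    decide (PySem.Str.strip cur ≠ "") = pvAnyNonws g := by
  rw [Bool.eq_iff_iff, decide_eq_true_iff, ← pv_strip_J_ne_nil_iff]
  constructor
  · intro hne h2
    apply hne
    apply String.toList_inj.mp
    rw [pv_strip_toList g cur h, h2]
    rfl
  · intro hne h2
    apply hne
    rw [← pv_strip_toList g cur h, h2]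
    rfl

theorem pv_J_push (g : List String) (cur : String) (l : String) (h : cur.toList = pvJ g) :
    (cur ++ l ++ "\n").toList = pvJ (g ++ [l]) := by
  simp [pvJ, h]

theorem pv_J_single (l : String) : (l ++ "\n").toList = pvJ [l] := by simp [pvJ]

theorem pv_lemA (ls : List String) (g ms : List String) (cur : String) (hcur : cur.toList = pvJ g) :
    (let st := ls.foldl (fun (st : List String × String) line =>
        let line_upper := PySem.Str.strip (PySem.Str.upper line)
        if (pvIndicators.any fun ind => PySem.Str.isIn ind line_upper) && decide (PySem.Str.strip st.2 ≠ "") then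
          (st.1 ++ [PySem.Str.strip st.2], line ++ "\n")
        else
          (st.1, st.2 ++ line ++ "\n")) (ms, cur)
     if PySem.Str.strip st.2 ≠ "" then st.1 ++ [PySem.Str.strip st.2] else st.1)
    = ms ++ ((pvGrp (pvAnyNonws g) g ls).map pvStripJoin).filter (fun s => decide (s ≠ "")) := by
  induction ls generalizing g ms cur with
  | nil =>
    simp only [List.foldl_nil, pvGrp, List.map, List.filter]
    rw [pv_strip_eq_stripJoin g cur hcur]
    by_cases hne : pvStripJoin g ≠ ""
    · simp [hne]
    · simp at hne; simp [hne]
  | cons l ls ih =>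
    simp only [List.foldl_cons]
    rw [pv_cond_eq g cur hcur]
    by_cases hc : ((pvIndicators.any fun ind => PySem.Str.isIn ind (PySem.Str.strip (PySem.Str.upper l))) && pvAnyNonws g) = true
    · have h2 : pvIsSectionStart l = true ∧ pvAnyNonws g = true := by
        simpa [pvIsSectionStart] using hc
      have hstart := h2.1
      have hany := h2.2
      rw [if_pos hc]
      have hgrp : pvGrp (pvAnyNonws g) g (l :: ls) = g :: pvGrp (pvAnyNonws [l]) [l] ls := by
        rw [pvGrp, if_pos (by rw [hany, hstart]; rfl)]
        have : (pvAnyNonws g || pvNonws l) = pvAnyNonws [l] := by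
          simp [pvAnyNonws, pv_isStart_nonws l hstart]
        rw [this]
      rw [hgrp]
      have := ih [l] (ms ++ [PySem.Str.strip cur]) (l ++ "\n") (pv_J_single l)
      simp only at this ⊢
      rw [this, pv_strip_eq_stripJoin g cur hcur]
      have hkeep : decide (pvStripJoin g ≠ "") = true := by
        rw [← pv_strip_eq_stripJoin g cur hcur, pv_cond_eq g cur hcur]
        exact hany
      simp only [List.map_cons, List.filter_cons]
      simp only [decide_not] at hkeep ⊢
      rw [hkeep]
      simp
    · rw [if_neg hc]
      have hgrp : pvGrp (pvAnyNonws g) g (l :: ls) = pvGrp (pvAnyNonws (g ++ [l])) (g ++ [l]) ls := by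
        rw [pvGrp, if_neg (by rw [Bool.and_comm] at hc; exact hc)]
        have : (pvAnyNonws g || pvNonws l) = pvAnyNonws (g ++ [l]) := by
          simp [pvAnyNonws]
        rw [this]
      rw [hgrp]
      have := ih (g ++ [l]) ms (cur ++ l ++ "\n") (pv_J_push g cur l hcur)
      simpa using this

def pvCuts (i : Int) (seen : Bool) : List String → List Int
  | [] => []
  | l :: ls => (if seen && pvIsSectionStart l then [i] else []) ++ pvCuts (i + 1) (seen || pvNonws l) ls
def pvSliceGroups (lines : List String) (p : Int) (cs : List Int) : List (List String) :=
  let st := cs.foldl (fun (st : List (List String) × Int) c =>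
      (st.1 ++ [PySem.List.slice lines (some st.2) (some c)], c)) ([], p)
  st.1 ++ [PySem.List.slice lines (some st.2) none]

theorem pv_lemB1 (ls : List String) (i : Int) (seen : Bool) (acc : List Int) :
    ((PySem.List.enumerate ls i).foldl (fun (st : List Int × Bool) p =>
      (if st.2 && pvIsSectionStart p.2 then st.1 ++ [p.1] else st.1,
       st.2 || decide (PySem.Str.strip p.2 ≠ ""))) (acc, seen)).1 = acc ++ pvCuts i seen ls := by
  induction ls generalizing i seen acc with
  | nil => simp [PySem.List.enumerate_nil, pvCuts]
  | cons l ls ih =>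
    rw [PySem.List.enumerate_cons, List.foldl_cons, pvCuts]
    by_cases hc : (seen && pvIsSectionStart l) = true
    · simp only [hc, if_pos]
      rw [ih]
      simp [pvNonws]
    · simp only [Bool.not_eq_true] at hc
      simp only [hc, Bool.false_eq_true, ite_false]
      rw [ih]
      simp [pvNonws]

theorem pv_sliceGroups_acc (lines : List String) (cs : List Int) (acc : List (List String)) (p : Int) :
    cs.foldl (fun (st : List (List String) × Int) c =>
      (st.1 ++ [PySem.List.slice lines (some st.2) (some c)], c)) (acc, p)
    = (acc ++ (cs.foldl (fun (st : List (List String) × Int) c =>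
      (st.1 ++ [PySem.List.slice lines (some st.2) (some c)], c)) ([], p)).1,
       (cs.foldl (fun (st : List (List String) × Int) c =>
      (st.1 ++ [PySem.List.slice lines (some st.2) (some c)], c)) ([], p)).2) := by
  induction cs generalizing acc p with
  | nil => simp
  | cons c cs ih =>
    simp only [List.foldl_cons, List.nil_append]
    rw [ih (acc ++ [PySem.List.slice lines (some p) (some c)]) c,
        ih ([PySem.List.slice lines (some p) (some c)]) c]
    simp

theorem pv_sliceGroups_cons (lines : List String) (p c : Int) (cs : List Int) :
    pvSliceGroups lines p (c :: cs) = PySem.List.slice lines (some p) (some c) :: pvSliceGroups lines c cs := by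
  simp only [pvSliceGroups, List.foldl_cons]
  rw [pv_sliceGroups_acc lines cs ([] ++ [PySem.List.slice lines (some p) (some c)]) c]
  simp

theorem pv_lemB3 (ls : List String) (pre g : List String) (seen : Bool) :
    pvSliceGroups (pre ++ g ++ ls) (pre.length : Int)
      (pvCuts ((pre.length + g.length : Nat) : Int) seen ls) = pvGrp seen g ls := by
  induction ls generalizing pre g seen with
  | nil =>
    simp only [pvCuts, pvGrp, pvSliceGroups, List.foldl_nil]
    rw [PySem.List.slice_from_natCast]
    simp
  | cons l ls ih =>
    rw [pvCuts, pvGrp]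
    by_cases hc : (seen && pvIsSectionStart l) = true
    · rw [if_pos hc, if_pos hc, List.singleton_append, pv_sliceGroups_cons]
      have h1 : PySem.List.slice (pre ++ g ++ l :: ls) (some (pre.length : Int)) (some ((pre.length + g.length : Nat) : Int)) = g := by
        rw [PySem.List.slice_natCast]
        simp
      rw [h1]
      have h2 := ih (pre ++ g) [l] (seen || pvNonws l)
      simp only [List.append_assoc, List.singleton_append, List.length_append, List.length_cons,
        List.length_nil] at h2 ⊢
      push_cast at h2 ⊢
      exact congrArg (List.cons g) h2
    · rw [if_neg (by simpa using hc), if_neg (by simpa using hc)]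
      simp only [List.nil_append]
      have h2 := ih pre (g ++ [l]) (seen || pvNonws l)
      simp only [List.append_assoc, List.singleton_append, List.length_append, List.length_cons,
        List.length_nil] at h2 ⊢
      push_cast at h2 ⊢
      exact h2

theorem pv_tail_gen (ms : List (Int × String)) (acc : List (List (String × String))) :
    ms.foldl (fun acc p =>
      if 100 < PySem.Str.len p.2 then
        acc ++ [[("section_id", "SECTION_" ++ PySem.Int.toStr (p.1 + 1)), ("content", p.2), ("type", "general")]]
      else acc) acc
    = acc ++ ms.filterMap (fun p =>
      if 100 < PySem.Str.len p.2 then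
        some [("section_id", "SECTION_" ++ PySem.Int.toStr (p.1 + 1)), ("content", p.2), ("type", "general")]
      else none) := by
  induction ms generalizing acc with
  | nil => simp
  | cons p ms ih =>
    simp only [List.foldl_cons, List.filterMap_cons]
    by_cases hc : 100 < PySem.Str.len p.2
    · rw [if_pos hc, if_pos hc, ih]
      simp
    · rw [if_neg hc, if_neg hc, ih]

theorem pv_ms_eq (lines : List String) :
    (if PySem.Str.strip (lines.foldl (fun (st : List String × String) line =>
        if (pvIndicators.any fun ind => PySem.Str.isIn ind (PySem.Str.strip (PySem.Str.upper line))) && decide (PySem.Str.strip st.2 ≠ "") then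
          (st.1 ++ [PySem.Str.strip st.2], line ++ "\n")
        else (st.1, st.2 ++ line ++ "\n")) ([], "")).2 ≠ ""
     then (lines.foldl (fun (st : List String × String) line =>
        if (pvIndicators.any fun ind => PySem.Str.isIn ind (PySem.Str.strip (PySem.Str.upper line))) && decide (PySem.Str.strip st.2 ≠ "") then
          (st.1 ++ [PySem.Str.strip st.2], line ++ "\n")
        else (st.1, st.2 ++ line ++ "\n")) ([], "")).1 ++ [PySem.Str.strip (lines.foldl (fun (st : List String × String) line =>
        if (pvIndicators.any fun ind => PySem.Str.isIn ind (PySem.Str.strip (PySem.Str.upper line))) && decide (PySem.Str.strip st.2 ≠ "") then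
          (st.1 ++ [PySem.Str.strip st.2], line ++ "\n")
        else (st.1, st.2 ++ line ++ "\n")) ([], "")).2]
     else (lines.foldl (fun (st : List String × String) line =>
        if (pvIndicators.any fun ind => PySem.Str.isIn ind (PySem.Str.strip (PySem.Str.upper line))) && decide (PySem.Str.strip st.2 ≠ "") then
          (st.1 ++ [PySem.Str.strip st.2], line ++ "\n")
        else (st.1, st.2 ++ line ++ "\n")) ([], "")).1)
    = (((((PySem.List.enumerate lines).foldl (fun (st : List Int × Bool) p =>
          (if st.2 && pvIsSectionStart p.2 then st.1 ++ [p.1] else st.1,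
           st.2 || decide (PySem.Str.strip p.2 ≠ ""))) ([], false)).1.foldl
            (fun (st : List (List String) × Int) c =>
              (st.1 ++ [PySem.List.slice lines (some st.2) (some c)], c)) ([], 0)).1
        ++ [PySem.List.slice lines (some (((PySem.List.enumerate lines).foldl (fun (st : List Int × Bool) p =>
          (if st.2 && pvIsSectionStart p.2 then st.1 ++ [p.1] else st.1,
           st.2 || decide (PySem.Str.strip p.2 ≠ ""))) ([], false)).1.foldl
            (fun (st : List (List String) × Int) c =>
              (st.1 ++ [PySem.List.slice lines (some st.2) (some c)], c)) ([], 0)).2) none]).map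
          (fun g => PySem.Str.strip (PySem.Str.join "\n" g))).filter (fun s => decide (s ≠ "")) := by
  have hA := pv_lemA lines [] [] "" (by simp [pvJ])
  simp only at hA
  rw [hA]
  rw [pv_lemB1 lines 0 false []]
  have hB := pv_lemB3 lines [] [] false
  simp only [List.nil_append, List.length_nil, Nat.cast_zero, Nat.zero_add] at hB ⊢
  have : pvAnyNonws ([] : List String) = false := by simp [pvAnyNonws]
  rw [this]
  rw [← hB]
  rfl

-- ===== VERDICT (by name: the statement is the Claim_ definition above) =====
set_option maxHeartbeats 2000000 in
theorem create_enhanced_chunks_from_text_py_spec : Claim_equal_create_enhanced_chunks_from_text_py := by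
  intro text _
  unfold Spec_create_enhanced_chunks_from_text_py
  simp only [create_enhanced_chunks_from_text_py, create_enhanced_chunks_from_text_py_alt]
  rw [pv_ms_eq]
  rw [pv_tail_gen]
  simp only [List.nil_append]
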